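-- pv_equiv track=rewrite | github.com/fahamijemal/CSEC_CPD | A - Sereja and Dima.py | game_score
-- ===== SOURCE A (Python) =====
-- def game_score(n, cards):
--     sereja_score, dima_score = 0, 0
--     left, right = 0, n - 1
--     turn = 0
--
--     while left <= right:
--         if cards[left] > cards[right]:
--             chosen_card = cards[left]
--             left += 1
--         else:
--             chosen_card = cards[right]
--             right -= 1
--
--         if turn == 0:
--             sereja_score += chosen_card
--         else:
--             dima_score += chosen_card
--
--         turn ^= 1  # Toggle between 0 and 1 using XOR
--
--     return sereja_score, dima_score
-- ===== SOURCE B (Python) =====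
-- def game_score(n, cards):
--     # Phase 1: produce the pick sequence (two-pointer selection, no scoring here).
--     picks = []
--     left, right = 0, n - 1
--     while left <= right:
--         if cards[left] > cards[right]:
--             picks.append(cards[left])
--             left += 1
--         else:
--             picks.append(cards[right])
--             right -= 1
--     # Phase 2: distribute by turn parity with stride slices.
--     return sum(picks[0::2]), sum(picks[1::2])
-- ===== Notes on version B (the rewrite author's own statement) =====
-- stated objective: alternative
-- what changed: Split A's single interleaved loop (turn flag plus two running scores) into a produce phase that only records the chosen cards in pick order and a separate distribution phase that sums the even- and odd-indexed picks via stride slices.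
import Mathlib
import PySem

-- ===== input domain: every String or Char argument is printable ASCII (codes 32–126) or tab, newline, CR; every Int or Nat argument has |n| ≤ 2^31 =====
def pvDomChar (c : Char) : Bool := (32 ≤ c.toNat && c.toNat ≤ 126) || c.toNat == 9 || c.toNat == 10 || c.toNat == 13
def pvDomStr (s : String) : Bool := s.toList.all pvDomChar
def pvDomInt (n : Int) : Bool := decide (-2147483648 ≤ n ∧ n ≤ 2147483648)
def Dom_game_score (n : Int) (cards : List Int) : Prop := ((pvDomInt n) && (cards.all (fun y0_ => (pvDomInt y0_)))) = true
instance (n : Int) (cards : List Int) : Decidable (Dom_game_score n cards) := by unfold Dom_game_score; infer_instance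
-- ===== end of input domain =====

-- B keeps A's two-pointer selection but records picks first and scores them in a
-- separate parity-slice pass (alternative decomposition, same cost).

-- ===== PORT A =====
-- A's while-loop: state (left, right, turn, sereja_score, dima_score); the `_ , _`
-- match arm is the IndexError case, excluded by Pre_game_score.
def gameLoopA (cards : List Int) (left right turn s d : Int) : Int × Int :=
  if _h : left ≤ right then
    match PySem.List.pyGet? cards left, PySem.List.pyGet? cards right with
    | some cl, some cr =>
      if cl > cr then
        if turn == 0 then gameLoopA cards (left + 1) right (PySem.Int.bxor turn 1) (s + cl) d
        else gameLoopA cards (left + 1) right (PySem.Int.bxor turn 1) s (d + cl)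
      else
        if turn == 0 then gameLoopA cards left (right - 1) (PySem.Int.bxor turn 1) (s + cr) d
        else gameLoopA cards left (right - 1) (PySem.Int.bxor turn 1) s (d + cr)
    | _, _ => (s, d)
  else (s, d)
termination_by (right + 1 - left).toNat
decreasing_by all_goals omega

def game_score (n : Int) (cards : List Int) : Int × Int :=
  gameLoopA cards 0 (n - 1) 0 0 0

-- ===== PORT B =====
-- B's phase 1: the same two-pointer traversal, but it only records the chosen cards.
def picksLoop (cards : List Int) (left right : Int) : List Int :=
  if _h : left ≤ right then
    match PySem.List.pyGet? cards left, PySem.List.pyGet? cards right with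
    | some cl, some cr =>
      if cl > cr then cl :: picksLoop cards (left + 1) right
      else cr :: picksLoop cards left (right - 1)
    | _, _ => []
  else []
termination_by (right + 1 - left).toNat
decreasing_by all_goals omega

-- B's phase 2: sum(picks[0::2]), sum(picks[1::2]) (stride 2 ≠ 0, so slice? is some).
def game_score_alt (n : Int) (cards : List Int) : Int × Int :=
  (((PySem.List.slice? (picksLoop cards 0 (n - 1)) (some 0) none 2).getD []).sum,
   ((PySem.List.slice? (picksLoop cards 0 (n - 1)) (some 1) none 2).getD []).sum)

-- ===== PRECONDITION & SPEC =====
-- Pre_: exactly where Python A returns; for n > len(cards) both A and B raise IndexError.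
def Pre_game_score (n : Int) (cards : List Int) : Prop := n ≤ (cards.length : Int)
instance (n : Int) (cards : List Int) : Decidable (Pre_game_score n cards) := by
  unfold Pre_game_score; infer_instance

def pvWitness_game_score : Int × List Int := (3, [1, 2, 3])

def Spec_game_score (n : Int) (cards : List Int) (out : Int × Int) : Prop := out = game_score_alt n cards
instance (n : Int) (cards : List Int) (out : Int × Int) : Decidable (Spec_game_score n cards out) := by unfold Spec_game_score; infer_instance

-- ===== CLAIM (what is proved, stated in full; the proofs are below) =====
def Claim_equal_game_score : Prop := ∀ (n : Int) (cards : List Int), Dom_game_score n cards → Pre_game_score n cards → Spec_game_score n cards (game_score n cards)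

-- ===== LEMMAS AND PROOFS =====

-- even-indexed / odd-indexed elements, the structural form of picks[0::2] / picks[1::2]
def evens : List Int → List Int
  | [] => []
  | [x] => [x]
  | x :: _ :: l => x :: evens l

def odds : List Int → List Int
  | [] => []
  | _ :: l => evens l

theorem evens_cons (x : Int) (l : List Int) : evens (x :: l) = x :: odds l := by
  cases l <;> simp [evens, odds]

theorem core_evens (xs : List Int) :
    (List.range ((xs.length + 1) / 2)).filterMap (fun k => xs[2 * k]?) = evens xs := by
  fun_induction evens xs with
  | case1 => simp
  | case2 x => simp [List.range_succ]
  | case3 x y l ih =>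
      have h2 : (x :: y :: l).length = l.length + 2 := by simp
      rw [h2, show (l.length + 2 + 1) / 2 = (l.length + 1) / 2 + 1 by omega,
        List.range_succ_eq_map, List.filterMap_cons, List.filterMap_map]
      have hfun : ((fun k => (x :: y :: l)[2 * k]?) ∘ Nat.succ) = (fun k => l[2 * k]?) := by
        funext k
        simp only [Function.comp]
        rw [show 2 * Nat.succ k = 2 * k + 1 + 1 by omega]
        simp
      rw [hfun, ih]
      simp

theorem core_odds (xs : List Int) :
    (List.range (xs.length / 2)).filterMap (fun k => xs[2 * k + 1]?) = odds xs := by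
  cases xs with
  | nil => simp [odds]
  | cons y l =>
      rw [show (y :: l).length / 2 = (l.length + 1) / 2 by simp,
        show (fun k => (y :: l)[2 * k + 1]?) = (fun k => l[2 * k]?) by funext k; simp,
        core_evens]
      simp [odds]

theorem slice0 (xs : List Int) :
    (PySem.List.slice? xs (some 0) none 2).getD [] = evens xs := by
  rw [← core_evens xs]
  simp only [PySem.List.slice?, PySem.List.sliceIndices]
  norm_num
  split
  · congr 1
    all_goals first
      | omega
      | (congr 1; omega)
  · next hlen =>
      have h0 : xs.length = 0 := by omega
      simp [h0]

theorem slice1 (xs : List Int) :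
    (PySem.List.slice? xs (some 1) none 2).getD [] = odds xs := by
  rw [← core_odds xs]
  simp only [PySem.List.slice?, PySem.List.sliceIndices]
  norm_num
  by_cases h0 : xs.length = 0
  · simp [h0]
  · rw [show min (1 : Int) (xs.length : Int) = 1 by omega]
    split
    · congr 1
      all_goals first
        | omega
        | (congr 1; omega)
        | (funext k; congr 1; omega)
    · next hlen =>
        have h1 : xs.length = 1 := by omega
        simp [h1]

-- the main loop invariant: A's interleaved loop equals the parity split of the picks
theorem loop_eq (cards : List Int) :
    ∀ (fuel : Nat) (l r s d : Int), (r + 1 - l).toNat ≤ fuel →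
      0 ≤ l → r < (cards.length : Int) →
      gameLoopA cards l r 0 s d
          = (s + (evens (picksLoop cards l r)).sum, d + (odds (picksLoop cards l r)).sum)
        ∧ gameLoopA cards l r 1 s d
          = (s + (odds (picksLoop cards l r)).sum, d + (evens (picksLoop cards l r)).sum) := by
  intro fuel
  induction fuel with
  | zero =>
      intro l r s d hf hl hr
      have hgt : ¬ l ≤ r := by omega
      refine ⟨?_, ?_⟩ <;> (rw [gameLoopA, picksLoop]; simp [hgt, evens, odds])
  | succ m ih =>
      intro l r s d hf hl hr
      by_cases hle : l ≤ r
      · have hlg : PySem.List.pyGet? cards l = some cards[l.toNat] :=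
          PySem.List.pyGet?_eq_some_getElem cards hl (by omega)
        have hrg : PySem.List.pyGet? cards r = some cards[r.toNat] :=
          PySem.List.pyGet?_eq_some_getElem cards (by omega) hr
        have hx0 : PySem.Int.bxor 0 1 = 1 := by decide
        have hx1 : PySem.Int.bxor 1 1 = 0 := by decide
        by_cases hcmp : cards[l.toNat] > cards[r.toNat]
        · refine ⟨?_, ?_⟩ <;> rw [gameLoopA, picksLoop] <;>
            simp only [hle, dite_true, hlg, hrg, hcmp, if_true]
          · rw [show ((0 : Int) == 0) = true by decide]
            simp only [if_true, hx0,
              (ih (l + 1) r (s + cards[l.toNat]) d (by omega) (by omega) hr).2,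
              evens_cons, odds, List.sum_cons]
            simp only [add_assoc]
          · rw [show ((1 : Int) == 0) = false by decide]
            simp only [Bool.false_eq_true, if_false, hx1,
              (ih (l + 1) r s (d + cards[l.toNat]) (by omega) (by omega) hr).1,
              evens_cons, odds, List.sum_cons]
            simp only [add_assoc]
        · refine ⟨?_, ?_⟩ <;> rw [gameLoopA, picksLoop] <;>
            simp only [hle, dite_true, hlg, hrg, hcmp, if_false]
          · rw [show ((0 : Int) == 0) = true by decide]
            simp only [if_true, hx0,
              (ih l (r - 1) (s + cards[r.toNat]) d (by omega) hl (by omega)).2,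
              evens_cons, odds, List.sum_cons]
            simp only [add_assoc]
          · rw [show ((1 : Int) == 0) = false by decide]
            simp only [Bool.false_eq_true, if_false, hx1,
              (ih l (r - 1) s (d + cards[r.toNat]) (by omega) hl (by omega)).1,
              evens_cons, odds, List.sum_cons]
            simp only [add_assoc]
      · refine ⟨?_, ?_⟩ <;> (rw [gameLoopA, picksLoop]; simp [hle, evens, odds])

-- ===== VERDICT (by name: the statement is the Claim_ definition above) =====
theorem game_score_spec : Claim_equal_game_score := by
  intro n cards _hdom hpre
  unfold Spec_game_score game_score game_score_alt
  rw [slice0, slice1]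
  by_cases hn : n - 1 < (cards.length : Int)
  · have := (loop_eq cards (n - 1 + 1 - 0).toNat 0 (n - 1) 0 0 (by omega) (by omega) hn).1
    simp only [this, zero_add]
  · exact absurd hpre (by unfold Pre_game_score; omega)
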